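-- pv_equiv track=rewrite | github.com/tezeladata/algorithmical | Main account/codewars/Python/extra_kata4.py | data_reverse
-- ===== SOURCE A (Python) =====
-- def data_reverse(data):
--     new_arr = []
--     for i in range(0, len(data), 8):
--         new_arr.append(data[i:i+8])
--     new_arr = new_arr[::-1]
--     res_arr = []
--     for array in new_arr:
--         for num in array:
--             res_arr.append(num)
--     return res_arr
-- ===== SOURCE B (Python) =====
-- def data_reverse(data):
--     out = []
--     cur = []
--     for x in data:
--         cur.append(x)
--         if len(cur) == 8:
--             out.extend(reversed(cur))
--             cur = []
--     out.extend(reversed(cur))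
--     out.reverse()
--     return out
-- ===== Notes on version B (the rewrite author's own statement) =====
-- stated objective: alternative
-- what changed: Replaces A's three-stage slice pipeline (build a list of 8-slices by index arithmetic, reverse the chunk list, flatten with a nested loop) by a single element-wise pass that accumulates each 8-buffer reversed into one flat output and reverses it once at the end; no slicing, no list of chunks.
import Mathlib
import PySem

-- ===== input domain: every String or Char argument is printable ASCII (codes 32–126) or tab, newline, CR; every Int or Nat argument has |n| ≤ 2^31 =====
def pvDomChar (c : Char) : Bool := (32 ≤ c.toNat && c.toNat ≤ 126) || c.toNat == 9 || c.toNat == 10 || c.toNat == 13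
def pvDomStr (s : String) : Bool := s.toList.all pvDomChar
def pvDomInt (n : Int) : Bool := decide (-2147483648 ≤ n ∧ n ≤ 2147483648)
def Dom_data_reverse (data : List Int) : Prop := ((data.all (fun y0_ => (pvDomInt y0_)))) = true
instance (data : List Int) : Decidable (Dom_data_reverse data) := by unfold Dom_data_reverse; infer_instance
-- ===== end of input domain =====

-- B replaces A's slice-chunks / reverse-chunk-list / nested-flatten pipeline by a single
-- element-wise pass that accumulates each completed 8-buffer reversed into one flat output
-- and reverses it once at the end (no slicing, no list of chunks); alternative, same cost.

-- ===== PORT A =====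
def data_reverse (data : List Int) : List Int :=
  -- new_arr = []; for i in range(0, len(data), 8): new_arr.append(data[i:i+8])
  let new_arr :=
    (PySem.List.pyRange 0 (PySem.List.len data) 8).foldl
      (fun acc i => acc ++ [PySem.List.slice data (some i) (some (i + 8))]) []
  -- new_arr = new_arr[::-1]
  let new_arr := (PySem.List.slice? new_arr none none (-1)).getD []
  -- res_arr = []; for array in new_arr: for num in array: res_arr.append(num)
  new_arr.foldl (fun res arr => arr.foldl (fun r num => r ++ [num]) res) []

-- ===== PORT B =====
-- loop body: cur.append(x); if len(cur) == 8: out.extend(reversed(cur)); cur = []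
def pvStepB (st : List Int × List Int) (x : Int) : List Int × List Int :=
  if (st.2 ++ [x]).length = 8 then (st.1 ++ (st.2 ++ [x]).reverse, []) else (st.1, st.2 ++ [x])

def data_reverse_alt (data : List Int) : List Int :=
  -- out = []; cur = []; for x in data: <pvStepB>
  let st := data.foldl pvStepB ([], [])
  -- out.extend(reversed(cur)); out.reverse(); return out
  (st.1 ++ st.2.reverse).reverse

-- ===== PRECONDITION & SPEC =====
def Spec_data_reverse (data : List Int) (out : List Int) : Prop := out = data_reverse_alt data
instance (data : List Int) (out : List Int) : Decidable (Spec_data_reverse data out) := by unfold Spec_data_reverse; infer_instance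

-- ===== CLAIM (what is proved, stated in full; the proofs are below) =====
def Claim_equal_data_reverse : Prop := ∀ (data : List Int), Dom_data_reverse data → Spec_data_reverse data (data_reverse data)

-- ===== LEMMAS AND PROOFS =====

-- the common chunk function (A side, Int-indexed slice)
def pvChunk (data : List Int) (k : Nat) : List Int :=
  PySem.List.slice data (some (8 * (k : Int))) (some (8 * (k : Int) + 8))

-- Nat-indexed chunk
def chunkN (data : List Int) (k : Nat) : List Int := (data.drop (8 * k)).take 8

-- reference: reversed 8-chunks, recursively
def chunkRev (l : List Int) : List Int :=
  if _h : l = [] then [] else chunkRev (l.drop 8) ++ l.take 8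
termination_by l.length
decreasing_by
  simp only [List.length_drop]
  have := List.length_pos_of_ne_nil _h
  omega

-- A's result as reverse-of-chunks, flattened
lemma data_reverse_eq (data : List Int) :
    data_reverse data =
      (((List.range (if (0:Int) < data.length then (((data.length : Int) - 0 + 8 - 1) / 8).toNat else 0)).map
        (pvChunk data)).reverse).flatten := by
  unfold data_reverse
  simp only [PySem.List.len_eq, PySem.List.foldl_append_singleton_eq_map,
    PySem.List.slice?_none_none_neg_one, Option.getD_some, List.map_id', List.nil_append]
  rw [PySem.List.foldl_append_eq_flatten,
    PySem.List.pyRange_of_pos 0 ((data.length : Int)) (by norm_num), List.map_map,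
    List.nil_append]
  congr 3
  funext k
  simp [pvChunk, Function.comp]

lemma pvChunk_eq_chunkN (data : List Int) : pvChunk data = chunkN data := by
  funext k
  unfold pvChunk chunkN
  rw [show (8 : Int) * (k : Int) = ((8 * k : Nat) : Int) by push_cast; ring,
    show ((8 * k : Nat) : Int) + 8 = ((8 * k + 8 : Nat) : Int) by push_cast; ring,
    PySem.List.slice_natCast]
  congr 1
  omega

lemma M_eq (n : Nat) :
    (if (0:Int) < (n : Int) then (((n : Int) - 0 + 8 - 1) / 8).toNat else 0) = (n + 7) / 8 := by
  split_ifs with h <;> omega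

lemma A_flat (data : List Int) :
    data_reverse data =
      (((List.range ((data.length + 7) / 8)).map (chunkN data)).reverse).flatten := by
  rw [data_reverse_eq, M_eq]
  simp only [pvChunk_eq_chunkN]

lemma flat_chunkRev (l : List Int) :
    (((List.range ((l.length + 7) / 8)).map (chunkN l)).reverse).flatten = chunkRev l := by
  induction l using chunkRev.induct with
  | case1 => simp [chunkRev]
  | case2 l h ih =>
    have hpos := List.length_pos_of_ne_nil h
    have hm : (l.length + 7) / 8 = ((l.drop 8).length + 7) / 8 + 1 := by
      simp only [List.length_drop]; omega
    rw [hm, List.range_succ_eq_map]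
    simp only [List.map_cons, List.map_map]
    have hc : chunkN l ∘ Nat.succ = chunkN (l.drop 8) := by
      funext k
      simp only [chunkN, Function.comp, List.drop_drop]
      congr 2
      omega
    rw [hc]
    simp only [List.reverse_cons, List.flatten_append, List.flatten_cons,
      List.flatten_nil, List.append_nil]
    rw [ih]
    conv_rhs => rw [chunkRev]
    rw [dif_neg h]
    simp [chunkN]

-- B fold: the accumulator out is only ever appended to, so it factors out
lemma foldB_shift (l : List Int) (r0 c0 : List Int) :
    l.foldl pvStepB (r0, c0)
      = (r0 ++ (l.foldl pvStepB ([], c0)).1, (l.foldl pvStepB ([], c0)).2) := by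
  induction l generalizing r0 c0 with
  | nil => simp
  | cons a l ih =>
    by_cases h : (c0 ++ [a]).length = 8
    · simp only [List.foldl_cons, pvStepB, if_pos h]
      rw [ih (r0 ++ (c0 ++ [a]).reverse) [], ih ([] ++ (c0 ++ [a]).reverse) []]
      simp [List.append_assoc]
    · simp only [List.foldl_cons, pvStepB, if_neg h]
      rw [ih r0 (c0 ++ [a]), ih [] (c0 ++ [a])]

lemma foldB_small (l : List Int) (r0 c0 : List Int) (h : c0.length + l.length < 8) :
    l.foldl pvStepB (r0, c0) = (r0, c0 ++ l) := by
  induction l generalizing c0 with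
  | nil => simp
  | cons a l ih =>
    have h8 : (c0 ++ [a]).length ≠ 8 := by
      simp only [List.length_append, List.length_cons, List.length_nil] at h ⊢; omega
    simp only [List.foldl_cons, pvStepB, if_neg h8]
    rw [ih (c0 ++ [a]) (by simp at h ⊢; omega)]
    simp

lemma foldB_full (l : List Int) (r0 c0 : List Int) (h : c0.length + l.length = 8)
    (hl : l ≠ []) : l.foldl pvStepB (r0, c0) = (r0 ++ (c0 ++ l).reverse, []) := by
  induction l generalizing c0 with
  | nil => exact absurd rfl hl
  | cons a l ih =>
    by_cases hnil : l = []
    · subst hnil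
      have h8 : (c0 ++ [a]).length = 8 := by simp at h ⊢; omega
      simp only [List.foldl_cons, pvStepB, if_pos h8, List.foldl_nil]
    · have h8 : (c0 ++ [a]).length ≠ 8 := by
        have := List.length_pos_of_ne_nil hnil
        simp at h ⊢; omega
      simp only [List.foldl_cons, pvStepB, if_neg h8]
      rw [ih (c0 ++ [a]) (by simp at h ⊢; omega) hnil]
      simp

lemma B_take8 (t d : List Int) (ht : t.length = 8) :
    data_reverse_alt (t ++ d) = data_reverse_alt d ++ t := by
  unfold data_reverse_alt
  rw [List.foldl_append, foldB_full t [] [] (by simp [ht]) (by intro h; subst h; simp at ht)]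
  rw [List.nil_append, foldB_shift]
  simp [List.append_assoc]

lemma B_small (d : List Int) (h : d.length < 8) : data_reverse_alt d = d := by
  unfold data_reverse_alt
  rw [foldB_small d [] [] (by simpa)]
  simp

lemma B_eq_chunkRev (l : List Int) : data_reverse_alt l = chunkRev l := by
  induction l using chunkRev.induct with
  | case1 => simp [data_reverse_alt, chunkRev]
  | case2 l h ih =>
    rw [chunkRev, dif_neg h]
    by_cases hl : l.length < 8
    · rw [List.drop_eq_nil_of_le (by omega), List.take_of_length_le (by omega), B_small l hl]
      simp [chunkRev]
    · conv_lhs => rw [← List.take_append_drop 8 l]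
      rw [B_take8 _ _ (by simp; omega), ih]

-- ===== VERDICT (by name: the statement is the Claim_ definition above) =====
theorem data_reverse_spec : Claim_equal_data_reverse := by
  intro data _
  unfold Spec_data_reverse
  rw [A_flat, flat_chunkRev, B_eq_chunkRev]
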